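-- pv_equiv track=rewrite | github.com/microsoft/RD-Agent | rdagent/scenarios/agentic_sys/dev_new.py | _summarize_external_sources
-- ===== SOURCE A (Python) =====
-- from typing import Dict, Any, List, Optional
--
-- def _summarize_external_sources(sources: List[Dict[str, Any]]) -> str:
--     """
--     Summarize external sources for context injection
--
--     Args:
--         sources: List of external source dictionaries
--
--     Returns:
--         Formatted summary string
--     """
--     if not sources:
--         return "No external sources available."
--
--     summary_parts = []
--
--     # Count by credibility
--     high_cred = [s for s in sources if s.get('credibility_level') == 'High']
--     medium_cred = [s for s in sources if s.get('credibility_level') == 'Medium']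
--     low_cred = [s for s in sources if s.get('credibility_level') == 'Low']
--
--     summary_parts.append(
--         f"Retrieved {len(sources)} sources: "
--         f"{len(high_cred)} high-credibility, "
--         f"{len(medium_cred)} medium-credibility, "
--         f"{len(low_cred)} low-credibility"
--     )
--
--     # High credibility sources
--     if high_cred:
--         summary_parts.append(
--             "\nHigh-credibility sources:\n" +
--             "\n".join(f"  - {s['title'][:70]}" for s in high_cred[:3])
--         )
--
--     # Key insights from top sources
--     key_insights = []
--     for source in sources[:3]:
--         summary = source.get('summary', '')
--         if len(summary) > 50:
--             key_insights.append(f"  • {summary[:150]}...")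
--
--     if key_insights:
--         summary_parts.append("\nKey insights:\n" + "\n".join(key_insights))
--
--     return "\n".join(summary_parts)
-- ===== SOURCE B (Python) =====
-- def _summarize_external_sources(sources):
--     if not sources:
--         return "No external sources available."
--
--     # Single pass with an accumulator: counters and the two output blocks are
--     # built together in one loop; no intermediate filtered lists are materialised.
--     high = medium = low = 0
--     high_lines = []
--     insights = []
--     for i, s in enumerate(sources):
--         lvl = s.get('credibility_level')
--         if lvl == 'High':
--             high += 1
--             if len(high_lines) < 3:
--                 high_lines.append(f"  - {s['title'][:70]}")
--         elif lvl == 'Medium':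
--             medium += 1
--         elif lvl == 'Low':
--             low += 1
--         if i < 3:
--             summary = s.get('summary', '')
--             if len(summary) > 50:
--                 insights.append(f"  • {summary[:150]}...")
--
--     parts = [
--         f"Retrieved {len(sources)} sources: "
--         f"{high} high-credibility, "
--         f"{medium} medium-credibility, "
--         f"{low} low-credibility"
--     ]
--     if high:
--         parts.append("\nHigh-credibility sources:\n" + "\n".join(high_lines))
--     if insights:
--         parts.append("\nKey insights:\n" + "\n".join(insights))
--     return "\n".join(parts)
-- ===== Notes on version B (the rewrite author's own statement) =====
-- stated objective: alternative
-- what changed: Replaces A's four staged passes (three filtering comprehensions plus a separate insights loop over a slice) by ONE enumerate loop carrying an accumulator of three counters and the two output blocks, truncating the high-credibility block (len<3) and the insights (i<3) on the fly, so no filtered sub-lists are ever materialised.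
import Mathlib
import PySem

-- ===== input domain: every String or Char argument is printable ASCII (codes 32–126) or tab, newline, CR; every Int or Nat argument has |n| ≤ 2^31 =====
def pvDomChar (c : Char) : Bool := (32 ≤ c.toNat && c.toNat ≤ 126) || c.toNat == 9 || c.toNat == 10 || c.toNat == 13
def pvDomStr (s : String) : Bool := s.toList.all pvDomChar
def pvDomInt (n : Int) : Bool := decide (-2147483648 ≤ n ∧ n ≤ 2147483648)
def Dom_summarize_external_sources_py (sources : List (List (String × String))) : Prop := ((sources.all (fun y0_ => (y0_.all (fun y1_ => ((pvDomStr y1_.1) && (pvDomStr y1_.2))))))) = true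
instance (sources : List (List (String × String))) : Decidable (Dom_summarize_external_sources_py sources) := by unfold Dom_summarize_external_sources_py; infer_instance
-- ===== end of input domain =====

-- B replaces A's staged passes (three filters plus a separate loop over a slice) by ONE
-- enumerate loop with an accumulator of three counters and the two output blocks
-- (objective: alternative; return value proven equal on Pre_).

-- ===== PORT A =====
-- shared helper: Python s.get(k) on a source dict (first match)
def sget (s : List (String × String)) (k : String) : Option String :=
  (PySem.Dict.mk s).get? k

-- shared helper: the f-string of the count line (identical in A and B)
def countLine (n h m l : Nat) : String :=
  "Retrieved " ++ PySem.Int.toStr (n : Int) ++ " sources: " ++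
  PySem.Int.toStr (h : Int) ++ " high-credibility, " ++
  PySem.Int.toStr (m : Int) ++ " medium-credibility, " ++
  PySem.Int.toStr (l : Int) ++ " low-credibility"

-- shared helper: "  - {s['title'][:70]}" (s['title'] raises KeyError when absent; excluded by Pre_)
def titleLine (s : List (String × String)) : String :=
  "  - " ++ PySem.Str.slice ((sget s "title").getD "") none (some 70)

-- shared helper: "  • {summary[:150]}..."
def insightLine (summary : String) : String :=
  "  • " ++ PySem.Str.slice summary none (some 150) ++ "..."

def summarize_external_sources_py (sources : List (List (String × String))) : String :=
  if sources = [] then "No external sources available."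
  else
    let high_cred := sources.filter (fun s => sget s "credibility_level" == some "High")
    let medium_cred := sources.filter (fun s => sget s "credibility_level" == some "Medium")
    let low_cred := sources.filter (fun s => sget s "credibility_level" == some "Low")
    let summary_parts := [countLine sources.length high_cred.length medium_cred.length low_cred.length]
    let summary_parts := if high_cred = [] then summary_parts else
      summary_parts ++ ["\nHigh-credibility sources:\n" ++
        PySem.Str.join "\n" ((PySem.List.slice high_cred none (some 3)).map titleLine)]
    -- for source in sources[:3]: … append …
    let key_insights := (PySem.List.slice sources none (some 3)).foldl
      (fun acc source =>
        let summary := (sget source "summary").getD ""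
        if PySem.Str.len summary > 50 then acc ++ [insightLine summary] else acc) []
    let summary_parts := if key_insights = [] then summary_parts else
      summary_parts ++ ["\nKey insights:\n" ++ PySem.Str.join "\n" key_insights]
    PySem.Str.join "\n" summary_parts

-- ===== PORT B =====
-- the body of B's single `for i, s in enumerate(sources)` loop (state = (high, medium, low, high_lines, insights))
def stepB (st : Nat × Nat × Nat × List String × List String)
    (p : Int × List (String × String)) : Nat × Nat × Nat × List String × List String :=
  let i := p.1
  let s := p.2
  let lvl := sget s "credibility_level"
  let q : Nat × Nat × Nat × List String :=
    if lvl == some "High" then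
      (st.1 + 1, st.2.1, st.2.2.1,
        if st.2.2.2.1.length < 3 then st.2.2.2.1 ++ [titleLine s] else st.2.2.2.1)
    else if lvl == some "Medium" then (st.1, st.2.1 + 1, st.2.2.1, st.2.2.2.1)
    else if lvl == some "Low" then (st.1, st.2.1, st.2.2.1 + 1, st.2.2.2.1)
    else (st.1, st.2.1, st.2.2.1, st.2.2.2.1)
  let ins :=
    if i < 3 then
      let summary := (sget s "summary").getD ""
      if PySem.Str.len summary > 50 then st.2.2.2.2 ++ [insightLine summary] else st.2.2.2.2
    else st.2.2.2.2
  (q.1, q.2.1, q.2.2.1, q.2.2.2, ins)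

def summarize_external_sources_py_alt (sources : List (List (String × String))) : String :=
  if sources = [] then "No external sources available."
  else
    let st := (PySem.List.enumerate sources).foldl stepB (0, 0, 0, [], [])
    let high := st.1
    let medium := st.2.1
    let low := st.2.2.1
    let high_lines := st.2.2.2.1
    let insights := st.2.2.2.2
    let parts := [countLine sources.length high medium low]
    let parts := if high = 0 then parts else
      parts ++ ["\nHigh-credibility sources:\n" ++ PySem.Str.join "\n" high_lines]
    let parts := if insights = [] then parts else
      parts ++ ["\nKey insights:\n" ++ PySem.Str.join "\n" insights]
    PySem.Str.join "\n" parts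

-- ===== PRECONDITION & SPEC =====
-- Pre_ excludes inputs where some of the first three high-credibility sources lacks a 'title'
-- key: there Python A (and Python B alike) raises KeyError on s['title'].
def Pre_summarize_external_sources_py (sources : List (List (String × String))) : Prop :=
  ∀ s ∈ (sources.filter (fun s => sget s "credibility_level" == some "High")).take 3,
    (PySem.Dict.mk s).contains "title" = true
instance (sources : List (List (String × String))) : Decidable (Pre_summarize_external_sources_py sources) := by unfold Pre_summarize_external_sources_py; infer_instance

def pvWitness_summarize_external_sources_py : (List (List (String × String))) :=
  [[("credibility_level", "High"), ("title", "Paper A")], [("credibility_level", "Low")]]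

def Spec_summarize_external_sources_py (sources : List (List (String × String))) (out : String) : Prop := out = summarize_external_sources_py_alt sources
instance (sources : List (List (String × String))) (out : String) : Decidable (Spec_summarize_external_sources_py sources out) := by unfold Spec_summarize_external_sources_py; infer_instance

-- ===== CLAIM (what is proved, stated in full; the proofs are below) =====
def Claim_equal_summarize_external_sources_py : Prop := ∀ (sources : List (List (String × String))), Dom_summarize_external_sources_py sources → Pre_summarize_external_sources_py sources → Spec_summarize_external_sources_py sources (summarize_external_sources_py sources)

-- ===== LEMMAS AND PROOFS =====

-- one step of B's loop, written componentwise
theorem stepB_eq (h m l : Nat) (t ins : List String) (k : Int) (x : List (String × String)) :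
    stepB (h, m, l, t, ins) (k, x) =
      ((if sget x "credibility_level" == some "High" then h + 1 else h),
       (if sget x "credibility_level" == some "Medium" then m + 1 else m),
       (if sget x "credibility_level" == some "Low" then l + 1 else l),
       (if sget x "credibility_level" == some "High" then
          (if t.length < 3 then t ++ [titleLine x] else t) else t),
       (if k < 3 then
          (if PySem.Str.len ((sget x "summary").getD "") > 50
           then ins ++ [insightLine ((sget x "summary").getD "")] else ins)
        else ins)) := by
  simp only [stepB]
  by_cases h1 : sget x "credibility_level" == some "High"
  · have e1 : sget x "credibility_level" = some "High" := by simpa using h1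
    simp [e1]
  · by_cases h2 : sget x "credibility_level" == some "Medium"
    · have e2 : sget x "credibility_level" = some "Medium" := by simpa using h2
      simp [e2]
    · by_cases h3 : sget x "credibility_level" == some "Low"
      · have e3 : sget x "credibility_level" = some "Low" := by simpa using h3
        simp [e3]
      · simp [h1, h2, h3]

-- the invariant of B's single loop: the fold from any reachable state yields the staged result
theorem foldB_inv (ls : List (List (String × String))) (k : Int) (hk : 0 ≤ k)
    (h m l : Nat) (t ins : List String) (ht : t.length ≤ 3) :
    (PySem.List.enumerate ls k).foldl stepB (h, m, l, t, ins) =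
      (h + (ls.filter (fun s => sget s "credibility_level" == some "High")).length,
       m + (ls.filter (fun s => sget s "credibility_level" == some "Medium")).length,
       l + (ls.filter (fun s => sget s "credibility_level" == some "Low")).length,
       (t ++ ((ls.filter (fun s => sget s "credibility_level" == some "High")).map titleLine)).take 3,
       ins ++ ((ls.take (3 - k).toNat).filter
           (fun s => decide (PySem.Str.len ((sget s "summary").getD "") > 50))).map
         (fun s => insightLine ((sget s "summary").getD ""))) := by
  induction ls generalizing k h m l t ins with
  | nil => simp [PySem.List.enumerate_nil, List.take_of_length_le ht]
  | cons x xs ih =>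
    rw [PySem.List.enumerate_cons, List.foldl_cons, stepB_eq]
    have ht' : (if sget x "credibility_level" == some "High" then
        (if t.length < 3 then t ++ [titleLine x] else t) else t).length ≤ 3 := by
      split
      · split
        · simp
          omega
        · exact ht
      · exact ht
    rw [ih (k + 1) (by omega) _ _ _ _ _ ht']
    refine Prod.ext ?_ (Prod.ext ?_ (Prod.ext ?_ (Prod.ext ?_ ?_))) <;>
      simp only [List.filter_cons]
    · by_cases h1 : sget x "credibility_level" == some "High" <;> simp [h1] <;> omega
    · by_cases h1 : sget x "credibility_level" == some "Medium" <;> simp [h1] <;> omega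
    · by_cases h1 : sget x "credibility_level" == some "Low" <;> simp [h1] <;> omega
    · by_cases h1 : sget x "credibility_level" == some "High"
      · simp only [h1, if_pos, List.map_cons]
        by_cases h2 : t.length < 3
        · simp [h2, List.append_assoc]
        · have h3 : t.length = 3 := by omega
          simp [h2, List.take_append_of_le_length h3.ge, List.take_of_length_le h3.le]
      · simp [h1]
    · by_cases h1 : k < 3
      · have e1 : (3 - k).toNat = ((3 - (k + 1)).toNat) + 1 := by omega
        by_cases h2 : 50 < ((sget x "summary").getD "").length <;>
          simp [h1, h2, e1, List.take_succ_cons, List.append_assoc]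
      · have e1 : (3 - k).toNat = 0 := by omega
        have e2 : (3 - (k + 1)).toNat = 0 := by omega
        simp [h1, e1, e2]

-- xs[:3] is take 3
theorem slice3 {α : Type} (xs : List α) : PySem.List.slice xs none (some 3) = xs.take 3 := by
  rw [(by norm_num : (3 : Int) = ((3 : Nat) : Int)), PySem.List.slice_to_natCast]

-- A's key-insights accumulation loop is a filter-then-map
theorem foldl_ins (l : List (List (String × String))) (acc : List String) :
    l.foldl (fun acc source =>
      let summary := (sget source "summary").getD ""
      if PySem.Str.len summary > 50 then acc ++ [insightLine summary] else acc) acc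
    = acc ++ (l.filter (fun s => decide (PySem.Str.len ((sget s "summary").getD "") > 50))).map
        (fun s => insightLine ((sget s "summary").getD "")) := by
  induction l generalizing acc with
  | nil => simp
  | cons x xs ih =>
    simp only [List.foldl_cons]
    rw [ih]
    by_cases hx : 50 < ((sget x "summary").getD "").length <;>
      simp [hx, List.append_assoc]

-- ===== VERDICT (by name: the statement is the Claim_ definition above) =====
theorem summarize_external_sources_py_spec : Claim_equal_summarize_external_sources_py := by
  intro sources _ _
  unfold Spec_summarize_external_sources_py summarize_external_sources_py summarize_external_sources_py_alt
  by_cases h : sources = []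
  · simp [h]
  · have hfold := foldB_inv sources 0 (by norm_num) 0 0 0 [] [] (by simp)
    simp only [if_neg h, hfold, foldl_ins, slice3, Nat.zero_add, List.nil_append,
      (by decide : ((3 : Int) - 0).toNat = 3), List.map_take, List.length_eq_zero_iff]
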